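-- pv_equiv track=rewrite | github.com/Sparks241/JupyterNotebook | Internship/Stage2/提交/Tiger_machine/v2/tiger_machine_v2.py | get_multiplier
-- ===== SOURCE A (Python) =====
-- def get_multiplier(reel):
--     r1, r2, r3 = reel
--     if reel == ["DD", "DD", "DD"]:
--         return 100
--     elif reel == ["7", "7", "7"]:
--         return 80
--     elif reel == ["BBB", "BBB", "BBB"]:
--         return 40
--     elif reel == ["BB", "BB", "BB"]:
--         return 25
--     elif reel == ["B", "B", "B"]:
--         return 10
--     elif reel == ["C", "C", "C"]:
--         return 10
--     elif all(r in ["BBB", "BB", "B"] for r in reel) and len(set(reel)) > 1: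
--         return 5
--     elif (r1 == "C" and r2 == "C") or (r1 == "C" and r3 == "C") or (r2 == "C" and r3 == "C"):
--         return 5
--     elif "C" in reel:
--         return 2
--     else:
--         return 0
-- ===== SOURCE B (Python) =====
-- _PAY = {"DD": 100, "7": 80, "BBB": 40, "BB": 25, "B": 10, "C": 10}
--
-- def get_multiplier(reel):
--     r1, r2, r3 = reel
--     # build a frequency map once; every decision below reads the map, never the reel
--     counts = {}
--     for r in (r1, r2, r3):
--         counts[r] = counts.get(r, 0) + 1
--     if len(counts) == 1:                      # uniform reel: pay by table
--         return _PAY.get(r1, 0)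
--     if set(counts) <= {"B", "BB", "BBB"}:     # mixed B-family
--         return 5
--     c = counts.get("C", 0)
--     return 5 if c >= 2 else 2 if c == 1 else 0
-- ===== Notes on version B (the rewrite author's own statement) =====
-- stated objective: alternative
-- what changed: Instead of A's ordered chain of equality/membership tests over the reel, B builds a frequency map of the reel once and decides everything from that map: uniformity is len(counts)==1 paid via a payout table, the mixed B-family case is a key-set subset test, and the C rules are arithmetic on the single count counts.get('C',0).
import Mathlib
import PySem

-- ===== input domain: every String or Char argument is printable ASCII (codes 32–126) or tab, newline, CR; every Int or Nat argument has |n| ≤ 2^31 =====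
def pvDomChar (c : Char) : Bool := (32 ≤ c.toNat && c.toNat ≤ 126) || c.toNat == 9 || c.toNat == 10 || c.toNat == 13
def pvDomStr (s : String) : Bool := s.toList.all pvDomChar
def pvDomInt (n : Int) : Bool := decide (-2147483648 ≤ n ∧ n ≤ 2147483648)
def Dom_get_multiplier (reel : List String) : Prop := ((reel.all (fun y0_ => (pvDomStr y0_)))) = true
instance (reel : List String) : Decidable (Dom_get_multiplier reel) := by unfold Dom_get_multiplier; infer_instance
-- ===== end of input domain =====

-- ===== PORT A =====
-- B decides from a frequency map of the reel instead of A's ordered branch chain over the reel; return value only, objective: alternative.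
def get_multiplier (reel : List String) : Int :=
  match reel with
  | [r1, r2, r3] =>
    if reel = ["DD", "DD", "DD"] then 100
    else if reel = ["7", "7", "7"] then 80
    else if reel = ["BBB", "BBB", "BBB"] then 40
    else if reel = ["BB", "BB", "BB"] then 25
    else if reel = ["B", "B", "B"] then 10
    else if reel = ["C", "C", "C"] then 10
    else if (reel.all (fun r => r ∈ ["BBB", "BB", "B"])) ∧ 1 < (PySem.Set.ofList reel).length then 5
    else if (r1 = "C" ∧ r2 = "C") ∨ (r1 = "C" ∧ r3 = "C") ∨ (r2 = "C" ∧ r3 = "C") then 5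
    else if "C" ∈ reel then 2
    else 0
  | _ => 0  -- unreachable under Pre_ (Python raises on len ≠ 3)

-- ===== PORT B =====
def pvPay : PySem.Dict String Int :=
  PySem.Dict.ofList [("DD", 100), ("7", 80), ("BBB", 40), ("BB", 25), ("B", 10), ("C", 10)]

def get_multiplier_alt (reel : List String) : Int :=
  match reel with
  | [] => 0  -- unreachable under Pre_ (Python raises on len ≠ 3)
  | r1 :: t1 =>
    match t1 with
    | [] => 0
    | r2 :: t2 =>
      match t2 with
      | [] => 0
      | r3 :: t3 =>
        match t3 with
        | _ :: _ => 0
        | [] =>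
          -- counts[r] = counts.get(r, 0) + 1 over the three symbols
          let counts := [r1, r2, r3].foldl (fun d r => d.insert r (d.getD r 0 + 1))
            (PySem.Dict.empty : PySem.Dict String Int)
          if counts.size = 1 then pvPay.getD r1 0
          else if counts.keys.all (fun k => k ∈ ["B", "BB", "BBB"]) then 5  -- set(counts) <= {"B","BB","BBB"}
          else
            let c := counts.getD "C" 0
            if 2 ≤ c then 5 else if c = 1 then 2 else 0

-- ===== PRECONDITION & SPEC =====
-- Python A unpacks r1, r2, r3 = reel and raises ValueError unless the list has exactly 3 elements.
def Pre_get_multiplier (reel : List String) : Prop := reel.length = 3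
instance (reel : List String) : Decidable (Pre_get_multiplier reel) := by unfold Pre_get_multiplier; infer_instance
def pvWitness_get_multiplier : List String := ["B", "C", "DD"]
def Spec_get_multiplier (reel : List String) (out : Int) : Prop := out = get_multiplier_alt reel
instance (reel : List String) (out : Int) : Decidable (Spec_get_multiplier reel out) := by unfold Spec_get_multiplier; infer_instance

-- ===== CLAIM =====
def Claim_equal_get_multiplier : Prop := ∀ (reel : List String), Dom_get_multiplier reel → Pre_get_multiplier reel → Spec_get_multiplier reel (get_multiplier reel)

-- ===== LEMMAS AND PROOFS =====
-- the frequency map B builds for a 3-symbol reel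
def cnt3 (a b c : String) : PySem.Dict String Int :=
  [a, b, c].foldl (fun d r => d.insert r (d.getD r 0 + 1)) PySem.Dict.empty

theorem alt_eval (a b c : String) :
    get_multiplier_alt [a, b, c] =
      (if (cnt3 a b c).size = 1 then pvPay.getD a 0
       else if (cnt3 a b c).keys.all (fun k => k ∈ ["B", "BB", "BBB"]) then 5
       else if 2 ≤ (cnt3 a b c).getD "C" 0 then 5
       else if (cnt3 a b c).getD "C" 0 = 1 then 2 else 0) := rfl

theorem getD_pvPay (a : String) : pvPay.getD a 0 =
    if "DD" = a then 100 else if "7" = a then 80 else if "BBB" = a then 40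
    else if "BB" = a then 25 else if "B" = a then 10 else if "C" = a then 10
    else 0 := by
  have h : pvPay = PySem.Dict.mk [("DD", 100), ("7", 80), ("BBB", 40), ("BB", 25), ("B", 10), ("C", 10)] := by decide
  rw [PySem.Dict.getD, h]
  simp only [PySem.Dict.get?_mk_cons, beq_iff_eq]
  split_ifs <;> (try simp_all) <;> rfl

theorem mem_keys_cnt3 (a b c x : String) :
    x ∈ (cnt3 a b c).keys ↔ x = a ∨ x = b ∨ x = c := by
  simp only [cnt3, List.foldl]
  simp [PySem.Dict.mem_keys_insert, PySem.Dict.keys_empty]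
  tauto

theorem size_cnt3_uniform (a : String) : (cnt3 a a a).size = 1 := by
  simp [cnt3, List.foldl, PySem.Dict.size_insert, PySem.Dict.contains_eq_decide_mem_keys,
    PySem.Dict.mem_keys_insert, PySem.Dict.keys_empty,
    PySem.Dict.size_empty]

theorem size_cnt3_ne (a b c : String) (h : ¬(a = b ∧ b = c)) : (cnt3 a b c).size ≠ 1 := by
  by_cases hba : b = a <;> by_cases hca : c = a <;> by_cases hcb : c = b <;>
    simp_all [cnt3, List.foldl, PySem.Dict.size_insert, PySem.Dict.contains_eq_decide_mem_keys,
      PySem.Dict.mem_keys_insert, PySem.Dict.keys_empty,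
      PySem.Dict.size_empty]

set_option maxRecDepth 4000 in
theorem getD_C_cnt3 (a b c : String) : (cnt3 a b c).getD "C" 0 =
    (if a = "C" then 1 else 0) + (if b = "C" then 1 else 0) + (if c = "C" then 1 else 0) := by
  simp only [cnt3, List.foldl]
  rw [PySem.Dict.getD_insert, PySem.Dict.getD_insert, PySem.Dict.getD_insert]
  by_cases hCa : a = "C" <;> by_cases hCb : b = "C" <;> by_cases hCc : c = "C" <;>
    simp_all [PySem.Dict.getD_insert, PySem.Dict.getD_empty, eq_comm]

theorem all_keys_cnt3 (a b c : String) (P : String → Bool) :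
    (cnt3 a b c).keys.all P = (P a && P b && P c) := by
  rw [Bool.eq_iff_iff]
  simp only [List.all_eq_true, Bool.and_eq_true]
  constructor
  · intro h
    exact ⟨⟨h a ((mem_keys_cnt3 a b c a).mpr (by tauto)),
      h b ((mem_keys_cnt3 a b c b).mpr (by tauto))⟩,
      h c ((mem_keys_cnt3 a b c c).mpr (by tauto))⟩
  · rintro ⟨⟨ha, hb⟩, hc⟩ x hx
    rcases (mem_keys_cnt3 a b c x).mp hx with h | h | h
    · subst h; assumption
    · subst h; assumption
    · subst h; assumption

theorem one_lt_of_two_mem {x y : String} {l : List String} (hx : x ∈ l) (hy : y ∈ l)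
    (hxy : x ≠ y) : 1 < l.length := by
  match l with
  | [] => cases hx
  | [z] =>
    simp only [List.mem_singleton] at hx hy
    exact absurd (hx.trans hy.symm) hxy
  | _ :: _ :: _ => simp [List.length]

theorem set_len_nonuniform (a b c : String) (h : ¬(a = b ∧ b = c)) :
    1 < (PySem.Set.ofList [a, b, c] : List String).length := by
  by_cases hab : a = b
  · have hbc : b ≠ c := fun hbc => h ⟨hab, hbc⟩
    exact one_lt_of_two_mem ((PySem.Set.mem_ofList _ _).mpr (by simp))
      ((PySem.Set.mem_ofList [a, b, c] c).mpr (by simp)) hbc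
  · exact one_lt_of_two_mem ((PySem.Set.mem_ofList [a, b, c] a).mpr (by simp))
      ((PySem.Set.mem_ofList [a, b, c] b).mpr (by simp)) hab

theorem A_nonuniform (a b c : String) (h : ¬(a = b ∧ b = c)) :
    get_multiplier [a, b, c] =
      (if (a ∈ (["BBB", "BB", "B"] : List String) ∧ b ∈ (["BBB", "BB", "B"] : List String) ∧
            c ∈ (["BBB", "BB", "B"] : List String)) then 5
       else if (a = "C" ∧ b = "C") ∨ (a = "C" ∧ c = "C") ∨ (b = "C" ∧ c = "C") then 5
       else if "C" = a ∨ "C" = b ∨ "C" = c then 2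
       else 0) := by
  have hne : ∀ s : String, ¬([a, b, c] = [s, s, s]) := by
    intro s hs
    simp only [List.cons.injEq, and_true] at hs
    obtain ⟨h1, h2, h3⟩ := hs
    exact h ⟨h1.trans h2.symm, h2.trans h3.symm⟩
  have hset := set_len_nonuniform a b c h
  simp only [get_multiplier]
  rw [if_neg (hne "DD"), if_neg (hne "7"), if_neg (hne "BBB"), if_neg (hne "BB"),
    if_neg (hne "B"), if_neg (hne "C")]
  simp [hset, List.all_cons]

theorem B_nonuniform (a b c : String) (h : ¬(a = b ∧ b = c)) :
    get_multiplier_alt [a, b, c] =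
      (if (a ∈ (["BBB", "BB", "B"] : List String) ∧ b ∈ (["BBB", "BB", "B"] : List String) ∧
            c ∈ (["BBB", "BB", "B"] : List String)) then 5
       else if 2 ≤ ((if a = "C" then 1 else 0) + (if b = "C" then 1 else 0) +
            (if c = "C" then (1 : Int) else 0)) then 5
       else if ((if a = "C" then 1 else 0) + (if b = "C" then 1 else 0) +
            (if c = "C" then (1 : Int) else 0)) = 1 then 2
       else 0) := by
  rw [alt_eval, if_neg (size_cnt3_ne a b c h), getD_C_cnt3,
    all_keys_cnt3 a b c (fun k => k ∈ ["B", "BB", "BBB"])]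
  by_cases ha : a ∈ (["BBB", "BB", "B"] : List String) <;>
    by_cases hb : b ∈ (["BBB", "BB", "B"] : List String) <;>
      by_cases hc : c ∈ (["BBB", "BB", "B"] : List String) <;>
        simp_all <;> tauto

theorem eq_nonuniform (a b c : String) (h : ¬(a = b ∧ b = c)) :
    get_multiplier [a, b, c] = get_multiplier_alt [a, b, c] := by
  rw [A_nonuniform a b c h, B_nonuniform a b c h]
  by_cases hf : (a ∈ (["BBB", "BB", "B"] : List String) ∧ b ∈ (["BBB", "BB", "B"] : List String) ∧
      c ∈ (["BBB", "BB", "B"] : List String))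
  · rw [if_pos hf, if_pos hf]
  · rw [if_neg hf, if_neg hf]
    by_cases hCa : a = "C" <;> by_cases hCb : b = "C" <;> by_cases hCc : c = "C" <;>
      simp [hCa, hCb, hCc, eq_comm]

theorem eq_uniform (a : String) : get_multiplier [a, a, a] = get_multiplier_alt [a, a, a] := by
  by_cases k1 : a = "DD"; · subst k1; decide
  by_cases k2 : a = "7"; · subst k2; decide
  by_cases k3 : a = "BBB"; · subst k3; decide
  by_cases k4 : a = "BB"; · subst k4; decide
  by_cases k5 : a = "B"; · subst k5; decide
  by_cases k6 : a = "C"; · subst k6; decide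
  have k1' : ¬"DD" = a := fun h => k1 h.symm
  have k2' : ¬"7" = a := fun h => k2 h.symm
  have k3' : ¬"BBB" = a := fun h => k3 h.symm
  have k4' : ¬"BB" = a := fun h => k4 h.symm
  have k5' : ¬"B" = a := fun h => k5 h.symm
  have k6' : ¬"C" = a := fun h => k6 h.symm
  have hB : get_multiplier_alt [a, a, a] = 0 := by
    rw [alt_eval, if_pos (size_cnt3_uniform a), getD_pvPay]
    simp [k1', k2', k3', k4', k5', k6']
  rw [hB]
  simp [get_multiplier, PySem.Set.ofList, PySem.Set.add, PySem.Set.contains, PySem.Set.empty,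
    k1, k2, k3, k4, k5, k6, k6']

-- ===== VERDICT =====
theorem get_multiplier_spec : Claim_equal_get_multiplier := by
  intro reel _ hpre
  match reel, hpre with
  | [a, b, c], _ =>
    by_cases h : a = b ∧ b = c
    · obtain ⟨h1, h2⟩ := h; subst h1; subst h2
      exact eq_uniform a
    · exact eq_nonuniform a b c h
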